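-- pv_equiv track=rewrite | github.com/PaddyCox/project-euler | problem_110/p110.py | brute_recursive
-- ===== SOURCE A (Python) =====
-- import copy
--
-- def brute_recursive(z, max_n, factors):
--     """Return all integers < z that divide z**2"""
--     if z > max_n:
--         return []
--     integers_z = [z]
--
--     for f in factors:
--         remaining_pf = copy.copy(factors)
--         remaining_pf.remove(f)
--         z_new = z * f
--         integers_z += brute_recursive(z_new, max_n, remaining_pf)
--
--     return integers_z
-- ===== SOURCE B (Python) =====
-- def brute_recursive(z, max_n, factors):
--     """Return all integers < z that divide z**2 (iterative DFS with an explicit stack)."""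
--     result = []
--     stack = [(z, factors)]
--     while stack:
--         z0, fs = stack.pop()
--         if z0 > max_n:
--             continue
--         result.append(z0)
--         for f in reversed(fs):
--             remaining = fs.copy()
--             remaining.remove(f)
--             stack.append((z0 * f, remaining))
--     return result
-- ===== Notes on version B (the rewrite author's own statement) =====
-- stated objective: alternative
-- what changed: Replaced the recursive pre-order enumeration by an iterative DFS over an explicit LIFO stack of (z, factors) states, pushing children in reversed factor order so they pop left-to-right.
import Mathlib
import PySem

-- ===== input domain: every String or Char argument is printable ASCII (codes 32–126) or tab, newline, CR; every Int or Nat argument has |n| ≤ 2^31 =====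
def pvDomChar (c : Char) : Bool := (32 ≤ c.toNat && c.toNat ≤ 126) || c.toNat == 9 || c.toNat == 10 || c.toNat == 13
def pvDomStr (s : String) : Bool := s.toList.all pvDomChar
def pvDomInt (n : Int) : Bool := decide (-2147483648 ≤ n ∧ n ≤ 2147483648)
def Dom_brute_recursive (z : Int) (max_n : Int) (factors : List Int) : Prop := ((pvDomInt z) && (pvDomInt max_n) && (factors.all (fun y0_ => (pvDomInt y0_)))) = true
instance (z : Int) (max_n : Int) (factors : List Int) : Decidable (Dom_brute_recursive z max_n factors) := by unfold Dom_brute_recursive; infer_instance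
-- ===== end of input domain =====

-- B replaces A's recursion by an iterative DFS over an explicit LIFO stack (alternative decomposition, same cost); return values are equal, neither implementation mutates its arguments.

-- ===== PORT A =====
-- Fuel = factors.length on entry; each recursive call removes exactly one factor,
-- so the fuel-0 branch is only ever reached with an empty factor list (empty loop).
def bruteRecAux (fuel : Nat) (z : Int) (max_n : Int) (factors : List Int) : List Int :=
  match fuel with
  | 0 => if z > max_n then [] else [z]
  | Nat.succ fuel' =>
    if z > max_n then []
    else
      factors.foldl
        (fun acc f =>
          acc ++ bruteRecAux fuel' (z * f) max_n ((PySem.List.remove? factors f).getD []))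
        [z]

def brute_recursive (z : Int) (max_n : Int) (factors : List Int) : List Int :=
  bruteRecAux factors.length z max_n factors

-- ===== PORT B =====
-- bruteStackMeasure and the two lemmas below exist only to justify termination of
-- B's while loop (cited by name in decreasing_by).
def bruteStackMeasure (st : List (Int × List Int)) : Nat :=
  (st.map (fun p => Nat.factorial (p.2.length + 1))).sum

theorem bruteStackMeasure_foldl_cons (c : Int → Int × List Int) (l : List Int)
    (rest : List (Int × List Int)) :
    bruteStackMeasure (l.foldl (fun s f => c f :: s) rest)
      = (l.map (fun f => Nat.factorial ((c f).2.length + 1))).sum + bruteStackMeasure rest := by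
  induction l generalizing rest with
  | nil => simp
  | cons a l ih =>
    rw [List.foldl_cons, ih]
    simp only [bruteStackMeasure, List.map_cons, List.sum_cons]
    omega

theorem bruteLoop_dec (z0 : Int) (fs : List Int) (rest : List (Int × List Int)) :
    bruteStackMeasure
      (fs.reverse.foldl (fun s f => (z0 * f, (PySem.List.remove? fs f).getD []) :: s) rest)
      < bruteStackMeasure ((z0, fs) :: rest) := by
  rw [bruteStackMeasure_foldl_cons]
  have hmap : ∀ f ∈ fs.reverse,
      Nat.factorial (((z0 * f, (PySem.List.remove? fs f).getD []) : Int × List Int).2.length + 1)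
        = Nat.factorial fs.length := by
    intro f hf
    rw [List.mem_reverse] at hf
    rw [PySem.List.remove?_eq_some_erase _ _ hf]
    simp only [Option.getD_some]
    congr 1
    have h1 := List.length_erase_of_mem hf
    have h2 : 1 ≤ fs.length := List.length_pos_of_mem hf
    omega
  rw [List.map_congr_left hmap, List.map_const', List.sum_replicate]
  simp only [bruteStackMeasure, List.map_cons, List.sum_cons, List.length_reverse,
    Nat.factorial_succ, smul_eq_mul]
  have hp := Nat.factorial_pos fs.length
  nlinarith

def bruteLoop (max_n : Int) (st : List (Int × List Int)) (res : List Int) : List Int :=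
  match st with
  | [] => res
  | (z0, fs) :: rest =>
    if z0 > max_n then bruteLoop max_n rest res
    else
      bruteLoop max_n
        (fs.reverse.foldl
          (fun s f => (z0 * f, (PySem.List.remove? fs f).getD []) :: s) rest)
        (res ++ [z0])
termination_by bruteStackMeasure st
decreasing_by
  · simp only [bruteStackMeasure, List.map_cons, List.sum_cons]
    have := Nat.factorial_pos (fs.length + 1)
    omega
  · have e : fs.reverse.foldl (fun s f => (z0 * f, (PySem.List.remove? fs f).getD []) :: s) rest
        = fs.attach.reverse.foldl
            (fun s x => (z0 * x.1, (PySem.List.remove? fs x.1).getD []) :: s) rest := by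
      conv_lhs => rw [← List.attach_map_subtype_val fs]
      rw [← List.map_reverse, List.foldl_map]
      simp only [List.attach_map_subtype_val]
    exact e ▸ bruteLoop_dec z0 fs rest


def brute_recursive_alt (z : Int) (max_n : Int) (factors : List Int) : List Int :=
  bruteLoop max_n [(z, factors)] []

-- ===== PRECONDITION & SPEC =====
def Spec_brute_recursive (z : Int) (max_n : Int) (factors : List Int) (out : List Int) : Prop := out = brute_recursive_alt z max_n factors
instance (z : Int) (max_n : Int) (factors : List Int) (out : List Int) : Decidable (Spec_brute_recursive z max_n factors out) := by unfold Spec_brute_recursive; infer_instance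

-- ===== CLAIM (what is proved, stated in full; the proofs are below) =====
def Claim_equal_brute_recursive : Prop := ∀ (z : Int) (max_n : Int) (factors : List Int), Dom_brute_recursive z max_n factors → Spec_brute_recursive z max_n factors (brute_recursive z max_n factors)

-- ===== LEMMAS AND PROOFS =====
theorem bruteRecAux_of_gt (fuel : Nat) (z max_n : Int) (fs : List Int) (h : z > max_n) :
    bruteRecAux fuel z max_n fs = [] := by
  cases fuel <;> simp [bruteRecAux, h]

theorem attach_reverse_foldl_cons (z0 : Int) (fs : List Int) (rest : List (Int × List Int)) :
    fs.attach.reverse.foldl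
        (fun s (x : {x // x ∈ fs}) => (z0 * x.1, (PySem.List.remove? fs x.1).getD []) :: s) rest
      = fs.map (fun f => (z0 * f, (PySem.List.remove? fs f).getD [])) ++ rest := by
  have e : fs.reverse.foldl (fun s f => (z0 * f, (PySem.List.remove? fs f).getD []) :: s) rest
      = fs.attach.reverse.foldl
          (fun s x => (z0 * x.1, (PySem.List.remove? fs x.1).getD []) :: s) rest := by
    conv_lhs => rw [← List.attach_map_subtype_val fs]
    rw [← List.map_reverse, List.foldl_map]
    simp only [List.attach_map_subtype_val]
  rw [← e]
  induction fs <;> simp_all [List.foldl_reverse]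

theorem bruteRecAux_cons (z0 max_n a : Int) (t : List Int) (h : ¬ z0 > max_n) :
    bruteRecAux (Nat.succ t.length) z0 max_n (a :: t)
      = z0 :: ((a :: t).map
          (fun f => bruteRecAux t.length (z0 * f) max_n ((PySem.List.remove? (a :: t) f).getD []))).flatten := by
  rw [bruteRecAux]
  simp [h]

theorem bruteLoop_eq (max_n : Int) (st : List (Int × List Int)) (res : List Int) :
    bruteLoop max_n st res
      = res ++ (st.map (fun p => bruteRecAux p.2.length p.1 max_n p.2)).flatten := by
  induction st, res using bruteLoop.induct max_n with
  | case1 res => simp [bruteLoop]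
  | case2 res z0 fs rest h ih =>
    rw [bruteLoop, if_pos h, ih]
    simp [bruteRecAux_of_gt _ _ _ _ h]
  | case3 res z0 fs rest h ih =>
    rw [bruteLoop, if_neg h]
    rw [show (fs.reverse.foldl
          (fun s f => (z0 * f, (PySem.List.remove? fs f).getD []) :: s) rest)
        = fs.attach.reverse.foldl
          (fun s (x : {x // x ∈ fs}) => (z0 * x.1, (PySem.List.remove? fs x.1).getD []) :: s) rest from by
      conv_lhs => rw [← List.attach_map_subtype_val fs]
      rw [← List.map_reverse, List.foldl_map]
      simp only [List.attach_map_subtype_val]]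
    rw [ih, attach_reverse_foldl_cons]
    cases fs with
    | nil => simp [bruteRecAux, h]
    | cons a t =>
      simp only [List.map_append, List.flatten_append, List.map_cons, List.flatten_cons,
        List.length_cons]
      rw [show t.length + 1 = Nat.succ t.length from rfl, bruteRecAux_cons _ _ _ _ h]
      simp only [List.cons_append, List.nil_append, List.append_assoc, List.append_cancel_left_eq,
        List.map_map, List.map_cons, List.flatten_cons]
      simp only [PySem.List.remove?_cons_self, Option.getD_some]
      have heq : (t.map ((fun p => bruteRecAux p.2.length p.1 max_n p.2)
              ∘ fun f => ((z0 * f, (PySem.List.remove? (a :: t) f).getD []) : Int × List Int)))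
          = t.map (fun f => bruteRecAux t.length (z0 * f) max_n ((PySem.List.remove? (a :: t) f).getD [])) := by
        apply List.map_congr_left
        intro f hf
        simp only [Function.comp]
        rw [PySem.List.remove?_eq_some_erase _ _ (List.mem_cons_of_mem a hf)]
        simp [List.length_erase_of_mem (List.mem_cons_of_mem a hf)]
      rw [heq]

-- ===== VERDICT (by name: the statement is the Claim_ definition above) =====
theorem brute_recursive_spec : Claim_equal_brute_recursive := by
  intro z max_n factors _
  unfold Spec_brute_recursive brute_recursive brute_recursive_alt
  rw [bruteLoop_eq]
  simp
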